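-- pv_equiv track=rewrite | github.com/therealkraus/learning | python/labs109.py | words_with_letters
-- ===== SOURCE A (Python) =====
-- def words_with_letters(words, letters):
--     result = []
--     letters_length = len(letters)
--     for w in words:
--         if len(w) >= letters_length:
--             word_iter = iter(w)
--             if all(l in word_iter for l in letters):
--                 result.append(w)
--     # result = [w for w in words if all(l in iter(w) for l in letters)]
--     return result
-- ===== SOURCE B (Python) =====
-- def words_with_letters(words, letters):
--     result = []
--     for w in words:
--         # inverted index: char -> increasing list of positions in w
--         pos = {}
--         for i, c in enumerate(w):
--             pos.setdefault(c, []).append(i)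
--         at = 0
--         ok = True
--         for l in letters:
--             lst = pos.get(l, [])
--             # binary search: first index in lst whose value is >= at
--             lo, hi = 0, len(lst)
--             while lo < hi:
--                 mid = (lo + hi) // 2
--                 if lst[mid] < at:
--                     lo = mid + 1
--                 else:
--                     hi = mid
--             if lo == len(lst):
--                 ok = False
--                 break
--             at = lst[lo] + 1
--         if ok:
--             result.append(w)
--     return result
-- ===== Notes on version B (the rewrite author's own statement) =====
-- stated objective: alternative
-- what changed: Replaces A's shared-iterator greedy scan by an inverted index: per word it builds a dict mapping each character to its sorted position list, then answers each letter query by binary search for the first occurrence at or after the current position.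
import Mathlib
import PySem

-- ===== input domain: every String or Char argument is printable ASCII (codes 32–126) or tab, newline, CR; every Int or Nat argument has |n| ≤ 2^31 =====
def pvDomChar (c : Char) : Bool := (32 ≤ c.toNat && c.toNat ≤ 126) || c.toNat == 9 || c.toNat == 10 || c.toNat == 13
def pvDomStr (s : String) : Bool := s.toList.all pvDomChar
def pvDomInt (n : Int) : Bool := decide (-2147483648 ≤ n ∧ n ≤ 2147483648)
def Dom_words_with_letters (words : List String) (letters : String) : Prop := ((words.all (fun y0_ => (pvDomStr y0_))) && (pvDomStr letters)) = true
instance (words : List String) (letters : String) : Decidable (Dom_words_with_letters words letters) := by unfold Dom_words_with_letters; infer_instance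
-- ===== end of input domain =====

-- B replaces A's shared-iterator greedy scan by an inverted index per word (dict from
-- character to its increasing position list) queried by binary search for the first
-- occurrence at or after the current position; same output (objective: alternative).

-- ===== PORT A =====
-- `l in word_iter`: consume the iterator until `l` is found, returning the rest; none = exhausted.
def pvFindAfter (l : Char) : List Char → Option (List Char)
  | [] => none
  | c :: cs => if c = l then some cs else pvFindAfter l cs

-- `all(l in word_iter for l in letters)`: letters outer, shared iterator state threaded through.
def pvAllIn : List Char → List Char → Bool
  | [], _ => true
  | l :: ls, it =>
    match pvFindAfter l it with
    | none => false
    | some it' => pvAllIn ls it'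

def words_with_letters (words : List String) (letters : String) : List String :=
  words.foldl
    (fun result w =>
      if w.toList.length ≥ letters.toList.length then
        if pvAllIn letters.toList w.toList then result ++ [w] else result
      else result)
    []

-- ===== PORT B =====
-- the hand-written `while lo < hi` binary search of Source B; lst[mid] is in range whenever
-- lo/hi are within bounds, so `getD … 0` is exact there; (lo+hi)//2 on Nats = Python's floor
def pvBisect (lst : List Int) (x : Int) (lo hi : Nat) : Nat :=
  if h : lo < hi then
    if lst.getD ((lo + hi) / 2) 0 < x then pvBisect lst x ((lo + hi) / 2 + 1) hi
    else pvBisect lst x lo ((lo + hi) / 2)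
  else lo
termination_by hi - lo
decreasing_by all_goals omega

-- the `for l in letters` loop with its break, carrying `at`
def pvMatch (P : PySem.Dict Char (List Int)) : List Char → Int → Bool
  | [], _ => true
  | l :: ls, at_ =>
    let lst := P.getD l []
    let j := pvBisect lst at_ 0 lst.length
    if j = lst.length then false else pvMatch P ls (lst.getD j 0 + 1)

-- `pos = {}; for i, c in enumerate(w): pos.setdefault(c, []).append(i)`
def pvBuildPos (cs : List Char) : PySem.Dict Char (List Int) :=
  (PySem.List.enumerate cs 0).foldl (fun d p => d.modify p.2 [] (· ++ [p.1])) PySem.Dict.empty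

def words_with_letters_alt (words : List String) (letters : String) : List String :=
  words.foldl
    (fun result w =>
      if pvMatch (pvBuildPos w.toList) letters.toList 0 then result ++ [w] else result)
    []

-- ===== PRECONDITION & SPEC =====
def Spec_words_with_letters (words : List String) (letters : String) (out : List String) : Prop := out = words_with_letters_alt words letters
instance (words : List String) (letters : String) (out : List String) : Decidable (Spec_words_with_letters words letters out) := by unfold Spec_words_with_letters; infer_instance

-- ===== CLAIM (what is proved, stated in full; the proofs are below) =====
def Claim_equal_words_with_letters : Prop := ∀ (words : List String) (letters : String), Dom_words_with_letters words letters → Spec_words_with_letters words letters (words_with_letters words letters)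

-- ===== LEMMAS AND PROOFS =====

-- occAux l cs k: the positions (absolute, starting at offset k) of l in cs, in order
def occAux (l : Char) : List Char → Int → List Int
  | [], _ => []
  | c :: cs, k => if c = l then k :: occAux l cs (k + 1) else occAux l cs (k + 1)

theorem occAux_bounds (l : Char) (cs : List Char) (k : Int) :
    ∀ j ∈ occAux l cs k, k ≤ j ∧ j < k + cs.length := by
  induction cs generalizing k with
  | nil => simp [occAux]
  | cons c cs ih =>
    intro j hj
    simp only [occAux] at hj
    split at hj
    · simp only [List.mem_cons] at hj
      rcases hj with rfl | hj
      · simp only [List.length_cons]; push_cast; omega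
      · have := ih (k + 1) j hj; simp only [List.length_cons]; push_cast; omega
    · have := ih (k + 1) j hj; simp only [List.length_cons]; push_cast; omega

theorem occAux_sorted (l : Char) (cs : List Char) (k : Int) :
    (occAux l cs k).Pairwise (· < ·) := by
  induction cs generalizing k with
  | nil => simp [occAux]
  | cons c cs ih =>
    simp only [occAux]
    split
    · exact List.Pairwise.cons (fun j hj => by have := occAux_bounds l cs (k+1) j hj; omega) (ih (k+1))
    · exact ih (k + 1)

theorem occAux_append (l : Char) (xs ys : List Char) (k : Int) :
    occAux l (xs ++ ys) k = occAux l xs k ++ occAux l ys (k + xs.length) := by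
  induction xs generalizing k with
  | nil => simp [occAux]
  | cons c cs ih =>
    simp only [occAux, List.cons_append, List.length_cons]
    split <;> (try simp only [List.cons_append]) <;> rw [ih (k + 1)] <;> congr 2 <;> push_cast <;> ring_nf

-- pvFindAfter in terms of the (relative) occurrence list
theorem pvFindAfter_eq_occ (l : Char) (xs : List Char) :
    pvFindAfter l xs = match occAux l xs 0 with
      | [] => none
      | j :: _ => some (xs.drop (j.toNat + 1)) := by
  induction xs with
  | nil => simp [pvFindAfter, occAux]
  | cons c cs ih =>
    simp only [pvFindAfter, occAux]
    by_cases hc : c = l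
    · simp [hc]
    · rw [if_neg hc, if_neg hc, ih]
      -- occAux l cs 1 = map (+1) of occAux l cs 0 — we avoid that: case on occAux l cs 0
      have hshift : ∀ (ds : List Char) (k : Int), occAux l ds (k + 1) = (occAux l ds k).map (· + 1) := by
        intro ds
        induction ds with
        | nil => intro k; simp [occAux]
        | cons d ds ihd =>
          intro k
          simp only [occAux]
          split <;> simp [ihd]
      have h1 : occAux l cs (0 + 1) = (occAux l cs 0).map (· + 1) := hshift cs 0
      rw [h1]
      cases hocc : occAux l cs 0 with
      | nil => simp
      | cons j t =>
        have hj0 : 0 ≤ j := (occAux_bounds l cs 0 j (by simp [hocc])).1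
        simp only [List.map_cons]
        have : (j + 1).toNat + 1 = (j.toNat + 1) + 1 := by omega
        rw [this]
        simp

-- the built dict's lookup IS the occurrence list
theorem pvSwapSwapEnum (cs : List Char) (s : Int) :
    PySem.List.enumerate cs s
      = ((PySem.List.enumerate cs s).map (fun p => (p.2, p.1))).map (fun p => (p.2, p.1)) := by
  rw [List.map_map]
  simp [Function.comp_def, Prod.mk.eta]

theorem pvFilterOcc (l : Char) (cs : List Char) (s : Int) :
    ((((PySem.List.enumerate cs s).map (fun p => (p.2, p.1))).filter (fun p => p.1 == l)).map (·.2))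
      = occAux l cs s := by
  induction cs generalizing s with
  | nil => simp [PySem.List.enumerate_nil, occAux]
  | cons c cs ih =>
    rw [PySem.List.enumerate_cons]
    simp only [List.map_cons, List.filter_cons, occAux]
    by_cases hc : c = l
    · simp [hc, ih (s + 1)]
    · simp only [hc, beq_iff_eq, if_false]
      simpa [hc] using ih (s + 1)

theorem pvBuildPos_getD (cs : List Char) (l : Char) :
    (pvBuildPos cs).getD l [] = occAux l cs 0 := by
  unfold pvBuildPos
  rw [pvSwapSwapEnum cs 0, List.foldl_map]
  have := PySem.Dict.getD_foldl_modify_append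
    (l := (PySem.List.enumerate cs 0).map (fun p => (p.2, p.1)))
    (d := (PySem.Dict.empty : PySem.Dict Char (List Int))) (c := l)
  simp only [this, PySem.Dict.getD_empty, List.nil_append]
  exact pvFilterOcc l cs 0

-- binary-search correctness on a strictly increasing list
theorem pvBisect_spec (lst : List Int) (x : Int) (hs : lst.Pairwise (· < ·)) :
    ∀ (lo hi : Nat), lo ≤ hi → hi ≤ lst.length →
    (∀ i, i < lo → lst.getD i 0 < x) →
    (∀ i, hi ≤ i → i < lst.length → ¬ lst.getD i 0 < x) →
    pvBisect lst x lo hi ≤ lst.length ∧ (∀ i, i < pvBisect lst x lo hi → lst.getD i 0 < x) ∧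
      (∀ i, pvBisect lst x lo hi ≤ i → i < lst.length → ¬ lst.getD i 0 < x) := by
  have mono : ∀ (p q : Nat), p ≤ q → q < lst.length → lst.getD p 0 ≤ lst.getD q 0 := by
    intro p q hpq hq
    rcases Nat.eq_or_lt_of_le hpq with rfl | hlt
    · exact le_refl _
    · have hp : p < lst.length := Nat.lt_trans hlt hq
      rw [List.getD_eq_getElem _ _ hp, List.getD_eq_getElem _ _ hq]
      exact le_of_lt (List.pairwise_iff_getElem.mp hs p q hp hq hlt)
  intro lo hi
  generalize hfuel : hi - lo = n
  induction n using Nat.strong_induction_on generalizing lo hi with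
  | _ n ih =>
    intro hle hhi hlow hhigh
    by_cases h : lo < hi
    · have hmlt : (lo + hi) / 2 < lst.length := by omega
      unfold pvBisect
      rw [dif_pos h]
      by_cases hc : lst.getD ((lo + hi) / 2) 0 < x
      · rw [if_pos hc]
        exact ih (hi - ((lo + hi) / 2 + 1)) (by omega) _ _ rfl (by omega) hhi
          (fun i hi' => lt_of_le_of_lt (mono i ((lo + hi) / 2) (by omega) hmlt) hc) hhigh
      · rw [if_neg hc]
        exact ih ((lo + hi) / 2 - lo) (by omega) _ _ rfl (by omega) (by omega) hlow
          (fun i hi' hil hcon => hc (lt_of_le_of_lt (mono ((lo + hi) / 2) i hi' hil) hcon))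
    · unfold pvBisect
      rw [dif_neg h]
      have : lo = hi := by omega
      subst this
      exact ⟨hhi, hlow, hhigh⟩

theorem pv_getD_mem {l : List Int} {i : Nat} (h : i < l.length) : l.getD i 0 ∈ l := by
  rw [List.getD_eq_getElem _ _ h]
  exact List.getElem_mem h

-- one letter step: B's indexed binary-search step equals A's iterator step on the suffix
theorem pvStep (w : List Char) (l : Char) (a : Nat) (ha : a ≤ w.length) :
    let lst := (pvBuildPos w).getD l []
    let j := pvBisect lst (a : Int) 0 lst.length
    (j = lst.length → pvFindAfter l (w.drop a) = none) ∧
    (j ≠ lst.length → lst.getD j 0 = (a : Int) + ((occAux l (w.drop a) 0).headI) ∧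
        pvFindAfter l (w.drop a) = some (w.drop ((lst.getD j 0).toNat + 1)) ∧ 0 ≤ lst.getD j 0) := by
  intro lst j
  have hlst : lst = occAux l w 0 := pvBuildPos_getD w l
  have hsplit : occAux l w 0 = occAux l (w.take a) 0 ++ occAux l (w.drop a) (a : Int) := by
    conv_lhs => rw [← List.take_append_drop a w]
    rw [occAux_append]
    congr 2
    simp [List.length_take]
    omega
  have hshift : ∀ (ds : List Char) (k : Int), occAux l ds k = (occAux l ds 0).map (· + k) := by
    intro ds
    induction ds with
    | nil => intro k; simp [occAux]
    | cons d ds ihd =>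
      intro k
      simp only [occAux]
      split
      · rw [ihd (k + 1), ihd (0 + 1)]
        simp only [List.map_cons, List.map_map]
        congr 1
        · norm_num
        · apply List.map_congr_left; intro x _; simp only [Function.comp_apply]; ring
      · rw [ihd (k + 1), ihd (0 + 1)]
        simp only [List.map_map]
        apply List.map_congr_left; intro x _; simp only [Function.comp_apply]; ring
  set T := occAux l (w.take a) 0 with hT
  set D := occAux l (w.drop a) 0 with hD
  have hsplit' : lst = T ++ D.map (· + (a : Int)) := by
    rw [hlst, hsplit, ← hshift]
  have hTlt : ∀ v ∈ T, v < (a : Int) := by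
    intro v hv
    have := occAux_bounds l (w.take a) 0 v hv
    have : v < ((w.take a).length : Int) := by omega
    simp [List.length_take] at this
    omega
  have hDge : ∀ v ∈ D, 0 ≤ v := fun v hv => (occAux_bounds l (w.drop a) 0 v hv).1
  have hsorted : lst.Pairwise (· < ·) := by rw [hlst]; exact occAux_sorted l w 0
  -- the binary search returns exactly T.length when D ≠ [], else lst.length
  have hspec := pvBisect_spec lst (a : Int) hsorted 0 lst.length (Nat.zero_le _) (le_refl _)
    (by omega) (fun i h1 h2 => by omega)
  obtain ⟨hjle, hjlow, hjhigh⟩ := hspec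
  have hTlen : T.length ≤ lst.length := by rw [hsplit']; simp
  -- characterize j
  have hgetT : ∀ i, i < T.length → lst.getD i 0 = T.getD i 0 := by
    intro i hi
    rw [hsplit', List.getD_eq_getElem _ _ (by simp; omega), List.getElem_append_left (by omega),
        List.getD_eq_getElem _ _ hi]
  have hgetD : ∀ i, i < D.length → lst.getD (T.length + i) 0 = D.getD i 0 + (a : Int) := by
    intro i hi
    have hlen : T.length + i < lst.length := by rw [hsplit']; simp; omega
    rw [hsplit', List.getD_eq_getElem _ _ (by simp; omega)]
    rw [List.getElem_append_right (by omega)]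
    simp only [Nat.add_sub_cancel_left]
    rw [List.getElem_map]
    rw [List.getD_eq_getElem _ _ hi]
  have hlen' : lst.length = T.length + D.length := by rw [hsplit']; simp
  have hjeq : j = T.length ∨ (D = [] ∧ j = lst.length) := by
    by_cases hDnil : D = []
    · right
      refine ⟨hDnil, ?_⟩
      have hlT : lst = T := by rw [hsplit', hDnil]; simp
      by_contra hne
      have hjlt : j < lst.length := by omega
      have h1 := hjhigh j (le_refl _) hjlt
      apply h1
      have hjlt2 : j < T.length := by
        have := congrArg List.length hlT
        omega
      have hmem : T.getD j 0 ∈ T := pv_getD_mem hjlt2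
      have heq : lst.getD j 0 = T.getD j 0 := by rw [hlT]
      rw [heq]
      exact hTlt _ hmem
    · left
      have hD0 : 0 < D.length := List.length_pos_iff.mpr hDnil
      -- lst[T.length] ≥ a so j ≤ T.length; lst[i] < a for i < T.length so j ≥ T.length
      have h1 : ¬ lst.getD T.length 0 < (a : Int) := by
        rw [show T.length = T.length + 0 by omega, hgetD 0 hD0]
        have := hDge (D.getD 0 0) (pv_getD_mem hD0)
        omega
      have h2 : ∀ i, i < T.length → lst.getD i 0 < (a : Int) := by
        intro i hi
        rw [hgetT i hi]
        exact hTlt _ (pv_getD_mem hi)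
      by_contra hne
      rcases Nat.lt_or_ge j T.length with hlt | hge
      · exact absurd (h2 j hlt) (hjhigh j (le_refl _) (by omega))
      · have : T.length < j := by omega
        exact absurd (hjlow T.length this) h1
  constructor
  · intro hjfull
    -- D must be empty
    have hDnil : D = [] := by
      rcases hjeq with hj1 | ⟨hDnil, _⟩
      · by_contra hDnil
        have hD0 : 0 < D.length := List.length_pos_iff.mpr hDnil
        omega
      · exact hDnil
    rw [pvFindAfter_eq_occ, ← hD, hDnil]
  · intro hjne
    rcases hjeq with hj1 | ⟨_, hj2⟩
    · have hDnil : D ≠ [] := by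
        intro hDnil
        apply hjne
        rw [hj1, hlen', hDnil]
        simp
      obtain ⟨d, t, hDc⟩ := List.exists_cons_of_ne_nil hDnil
      have hval : lst.getD j 0 = d + (a : Int) := by
        rw [hj1, show T.length = T.length + 0 by omega, hgetD 0 (by rw [hDc]; simp), hDc]
        simp
      have hd0' : 0 ≤ d := hDge d (by rw [hDc]; simp)
      have h3 : 0 ≤ lst.getD j 0 := by rw [hval]; omega
      refine ⟨?_, ?_, h3⟩
      · rw [hval, hDc]
        simp only [List.headI]
        ring
      · rw [pvFindAfter_eq_occ, ← hD, hDc]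
        simp only
        rw [hval, List.drop_drop,
          show a + (d.toNat + 1) = (d + (a : Int)).toNat + 1 from by omega]
    · exact absurd hj2 hjne

-- per-word: B's indexed matcher equals A's iterator scan, from any position a
theorem pvMatch_eq_pvAllIn (w : List Char) (ls : List Char) (a : Nat) (ha : a ≤ w.length) :
    pvMatch (pvBuildPos w) ls (a : Int) = pvAllIn ls (w.drop a) := by
  induction ls generalizing a with
  | nil => simp [pvMatch, pvAllIn]
  | cons l ls ih =>
    obtain ⟨hnone, hsome⟩ := pvStep w l a ha
    simp only [pvMatch, pvAllIn]
    by_cases hj : pvBisect ((pvBuildPos w).getD l []) (a : Int) 0 ((pvBuildPos w).getD l []).length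
        = ((pvBuildPos w).getD l []).length
    · rw [if_pos hj, hnone hj]
    · rw [if_neg hj]
      obtain ⟨hval, hfind, hpos⟩ := hsome hj
      rw [hfind]
      set v := ((pvBuildPos w).getD l []).getD
        (pvBisect ((pvBuildPos w).getD l []) (a : Int) 0 ((pvBuildPos w).getD l []).length) 0 with hv
      have hcast : v + 1 = ((v.toNat + 1 : Nat) : Int) := by omega
      rw [hcast, ih (v.toNat + 1) ?hle]
      case hle =>
        -- v is an in-range occurrence position: a + head of occAux of the drop, head < drop length
        have hD := occAux_bounds l (w.drop a) 0
        by_cases hDnil : occAux l (w.drop a) 0 = []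
        · rw [pvFindAfter_eq_occ, hDnil] at hfind; simp at hfind
        · cases hDc : occAux l (w.drop a) 0 with
          | nil => exact absurd hDc hDnil
          | cons d t =>
            have hdmem : d ∈ occAux l (w.drop a) 0 := by rw [hDc]; simp
            have := hD d hdmem
            have hhead : (occAux l (w.drop a) 0).headI = d := by rw [hDc]; simp
            rw [hhead] at hval
            have hdroplen : ((w.drop a).length : Int) = (w.length : Int) - a := by
              simp [List.length_drop]; omega
            omega

-- pvAllIn success needs at least as many word chars as letters (A's guard is redundant)
theorem pvFindAfter_length {l : Char} {ws ws' : List Char}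
    (h : pvFindAfter l ws = some ws') : ws'.length < ws.length := by
  induction ws generalizing ws' with
  | nil => simp [pvFindAfter] at h
  | cons c cs ih =>
    simp only [pvFindAfter] at h
    split at h
    · cases h; simp
    · exact Nat.lt_trans (ih h) (by simp)

theorem pvAllIn_length {ls ws : List Char} (h : pvAllIn ls ws = true) :
    ls.length ≤ ws.length := by
  induction ls generalizing ws with
  | nil => simp
  | cons l ls ih =>
    simp only [pvAllIn] at h
    cases hf : pvFindAfter l ws with
    | none => rw [hf] at h; simp at h
    | some ws' =>
      rw [hf] at h
      have := ih h
      have := pvFindAfter_length hf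
      simp only [List.length_cons]
      omega

theorem pv_fold_eq (L : List Char) (words : List String) (acc : List String) :
    words.foldl
      (fun result w =>
        if w.toList.length ≥ L.length then
          if pvAllIn L w.toList then result ++ [w] else result
        else result) acc
    = words.foldl
      (fun result w =>
        if pvMatch (pvBuildPos w.toList) L 0 then result ++ [w] else result) acc := by
  induction words generalizing acc with
  | nil => rfl
  | cons w ws ih =>
    simp only [List.foldl_cons]
    have hm : pvMatch (pvBuildPos w.toList) L 0 = pvAllIn L w.toList := by
      simpa using pvMatch_eq_pvAllIn w.toList L 0 (Nat.zero_le _)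
    rw [hm]
    by_cases hs : pvAllIn L w.toList = true
    · rw [if_pos (pvAllIn_length hs), if_pos hs]
      exact ih _
    · have hsf : pvAllIn L w.toList = false := by simpa using hs
      rw [hsf]
      simp only [Bool.false_eq_true, if_false, ite_self]
      exact ih _

-- ===== VERDICT (by name: the statement is the Claim_ definition above) =====
theorem words_with_letters_spec : Claim_equal_words_with_letters := by
  intro words letters _
  unfold Spec_words_with_letters words_with_letters words_with_letters_alt
  exact pv_fold_eq letters.toList words []
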